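-- pv_equiv track=rewrite | github.com/vicburnew/pythonProject | src/task_2.py | get_polindroms
-- ===== SOURCE A (Python) =====
-- from typing import List
--
-- def get_polindroms(a: list[int]) -> List[int]:
--     """Функция, которая получает на вход список чисел и возвращает новый список,
--     содержащий только числа, которые являются палиндромами"""
--     new_list = []
--     for item in a:
--         item_string = str(item)
--         item_reversed = item_string[::-1]
--         if item_reversed == item_string:
--             new_list.append(item)
--     return new_list
-- ===== SOURCE B (Python) =====
-- def _is_pal(s):
--     if len(s) < 2:
--         return True
--     if s[0] != s[-1]:
--         return False
--     return _is_pal(s[1:-1])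
--
-- def get_polindroms(a):
--     result = []
--     for item in a:
--         if _is_pal(str(item)):
--             result.append(item)
--     return result
-- ===== Notes on version B (the rewrite author's own statement) =====
-- stated objective: alternative
-- what changed: Replaces A's build-the-reversed-string-and-compare check with a recursive peel-both-ends palindrome test on str(item) that stops at the first mismatching pair instead of always materialising the reversed string.
import Mathlib
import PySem

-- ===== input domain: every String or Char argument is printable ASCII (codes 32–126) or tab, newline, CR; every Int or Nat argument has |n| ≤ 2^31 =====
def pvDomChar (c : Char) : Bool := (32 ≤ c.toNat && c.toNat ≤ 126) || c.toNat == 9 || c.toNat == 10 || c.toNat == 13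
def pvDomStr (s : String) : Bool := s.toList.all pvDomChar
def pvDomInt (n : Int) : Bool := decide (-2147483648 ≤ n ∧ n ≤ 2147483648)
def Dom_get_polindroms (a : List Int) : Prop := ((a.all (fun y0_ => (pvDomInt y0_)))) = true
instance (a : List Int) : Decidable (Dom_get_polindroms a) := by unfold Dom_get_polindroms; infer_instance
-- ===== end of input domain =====

-- B replaces A's reverse-and-compare palindrome check with a recursive peel-both-ends test on str(item); same filter result.


-- ===== PORT A =====
-- str(item) → PySem.Int.toChars; s[::-1] → PySem.List.slice? … (-1) (step -1 ≠ 0, so the slice always succeeds; getD [] is never taken)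
def get_polindroms (a : List Int) : List Int :=
  a.foldl (fun new_list item =>
    let item_string := PySem.Int.toChars item
    let item_reversed := (PySem.List.slice? item_string none none (-1)).getD []
    if item_reversed = item_string then new_list ++ [item] else new_list) []

-- ===== PORT B =====
-- _is_pal: s[0] / s[-1] → PySem.List.pyGetD (indices in range when length ≥ 2, so the default is never taken); s[1:-1] → PySem.List.slice
def isPalPeel (s : List Char) : Bool :=
  if h : s.length < 2 then true
  else if PySem.List.pyGetD s 0 ' ' ≠ PySem.List.pyGetD s (-1) ' ' then false
  else isPalPeel (PySem.List.slice s (some 1) (some (-1)))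
termination_by s.length
decreasing_by
  have hne : s ≠ [] := by intro hn; subst hn; simp_all
  simp [PySem.List.length_slice, PySem.List.clampIdx, hne]
  omega

def get_polindroms_alt (a : List Int) : List Int :=
  a.foldl (fun result item =>
    if isPalPeel (PySem.Int.toChars item) then result ++ [item] else result) []

-- ===== PRECONDITION & SPEC =====
def Spec_get_polindroms (a : List Int) (out : List Int) : Prop := out = get_polindroms_alt a
instance (a : List Int) (out : List Int) : Decidable (Spec_get_polindroms a out) := by unfold Spec_get_polindroms; infer_instance

-- ===== CLAIM (what is proved, stated in full; the proofs are below) =====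
def Claim_equal_get_polindroms : Prop := ∀ (a : List Int), Dom_get_polindroms a → Spec_get_polindroms a (get_polindroms a)

-- ===== LEMMAS AND PROOFS =====

theorem slice_one_negone (xs : List Char) :
    PySem.List.slice xs (some 1) (some (-1)) = xs.tail.dropLast := by
  rcases eq_or_ne xs [] with rfl|h
  · simp [PySem.List.slice]
  · have h1 : 1 ≤ xs.length := List.length_pos_iff.mpr h
    simp [PySem.List.slice, PySem.List.clampIdx, h, List.dropLast_eq_take]
    congr 1
    · omega
    · simp [Nat.min_eq_left h1, List.drop_one]

theorem pyGetD_last (x : Char) (xs : List Char) (h : xs ≠ []) :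
    PySem.List.pyGetD (x :: xs) (-1) ' ' = xs.getLast h := by
  rw [List.getLast_eq_getElem]
  simp [PySem.List.pyGetD, PySem.List.pyGet?, PySem.List.pyIdx?]
  rw [List.getElem_cons]
  simp [h]

theorem isPalPeel_eq_reverse (s : List Char) : isPalPeel s = decide (s.reverse = s) := by
  by_cases h : s.length < 2
  · interval_cases hl : s.length <;> unfold isPalPeel <;> simp
    · rw [List.length_eq_zero_iff.mp hl]; simp
    · obtain ⟨c, rfl⟩ := List.length_eq_one_iff.mp hl; simp
  · -- s = x :: mid ++ [y]
    obtain ⟨x, t, rfl⟩ : ∃ x t, s = x :: t := by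
      cases s with
      | nil => simp at h
      | cons x t => exact ⟨x, t, rfl⟩
    have ht : t ≠ [] := by intro hn; subst hn; simp at h
    obtain ⟨mid, y, rfl⟩ := List.eq_nil_or_concat t |>.resolve_left ht
    simp only [List.concat_eq_append] at h ⊢
    unfold isPalPeel
    simp only [h, dite_false]
    have hget0 : PySem.List.pyGetD (x :: (mid ++ [y])) 0 ' ' = x := by
      have hpos : (0:Int) ≤ (mid.length : Int) + 1 := by positivity
      simp [PySem.List.pyGetD, PySem.List.pyGet?, PySem.List.pyIdx?, hpos]
    have hgetl : PySem.List.pyGetD (x :: (mid ++ [y])) (-1) ' ' = y := by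
      rw [pyGetD_last x (mid ++ [y]) (by simp)]
      simp
    have hslice : PySem.List.slice (x :: (mid ++ [y])) (some 1) (some (-1)) = mid := by
      rw [slice_one_negone]; simp
    rw [hget0, hgetl, hslice]
    have IH : isPalPeel mid = decide (mid.reverse = mid) :=
      isPalPeel_eq_reverse mid
    by_cases hxy : x = y
    · subst hxy
      simp only [ne_eq, not_true_eq_false, if_false, IH]
      simp [List.reverse_cons, List.reverse_append]
    · simp only [ne_eq, hxy, not_false_eq_true, if_true]
      simp [List.reverse_cons, List.reverse_append]
      intro h1 _
      exact hxy
termination_by s.length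
decreasing_by simp_all [List.concat_eq_append]

theorem cond_eq (item : Int) :
    (((PySem.List.slice? (PySem.Int.toChars item) none none (-1)).getD [] = PySem.Int.toChars item) : Prop)
    ↔ (isPalPeel (PySem.Int.toChars item) = true) := by
  rw [PySem.List.slice?_none_none_neg_one, isPalPeel_eq_reverse]
  simp only [Option.getD_some, decide_eq_true_eq]

-- ===== VERDICT (by name: the statement is the Claim_ definition above) =====
theorem get_polindroms_spec : Claim_equal_get_polindroms := by
  intro a hd
  clear hd
  unfold Spec_get_polindroms get_polindroms get_polindroms_alt
  induction a using List.reverseRecOn with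
  | nil => rfl
  | append_singleton xs x ih =>
    simp only [List.foldl_append, List.foldl_cons, List.foldl_nil]
    rw [ih]
    by_cases hc : isPalPeel (PySem.Int.toChars x) = true
    · rw [if_pos ((cond_eq x).mpr hc), if_pos hc]
    · rw [if_neg (fun hh => hc ((cond_eq x).mp hh)), if_neg hc]
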